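-- pv_equiv track=rewrite | github.com/bimanovrifaa/FP-KKA | tes.py | is_consistent_assignment
-- ===== SOURCE A (Python) =====
-- def is_consistent_assignment(grid):
--     for r in range(9):
--         seen = set()
--         for c in range(9):
--             v = grid[r][c]
--             if v != 0:
--                 if v in seen: return False
--                 seen.add(v)
--     for c in range(9):
--         seen = set()
--         for r in range(9):
--             v = grid[r][c]
--             if v != 0:
--                 if v in seen: return False
--                 seen.add(v)
--     for br in range(0,9,3):
--         for bc in range(0,9,3):
--             seen = set()
--             for r in range(br, br+3):
--                 for c in range(bc, bc+3):
--                     v = grid[r][c]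
--                     if v != 0:
--                         if v in seen: return False
--                         seen.add(v)
--     return True
-- ===== SOURCE B (Python) =====
-- def is_consistent_assignment(grid):
--     # One row-major pass; one set of (unit, value) keys: units 0-8 rows, 9-17 cols, 18-26 boxes.
--     seen = set()
--     for r in range(9):
--         for c in range(9):
--             v = grid[r][c]
--             if v != 0:
--                 for u in (r, 9 + c, 18 + (r // 3) * 3 + c // 3):
--                     if (u, v) in seen:
--                         return False
--                     seen.add((u, v))
--     return True
-- ===== Notes on version B (the rewrite author's own statement) =====
-- stated objective: alternative
-- what changed: Replaces A's three separate scoped scans (rows, then columns, then 3x3 boxes, each with its own fresh set) by a single row-major pass over the 81 cells maintaining one set of (unit, value) keys covering all 27 units (rows 0-8, columns 9-17, boxes 18-26), with early exit on the first duplicate.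
import Mathlib
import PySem

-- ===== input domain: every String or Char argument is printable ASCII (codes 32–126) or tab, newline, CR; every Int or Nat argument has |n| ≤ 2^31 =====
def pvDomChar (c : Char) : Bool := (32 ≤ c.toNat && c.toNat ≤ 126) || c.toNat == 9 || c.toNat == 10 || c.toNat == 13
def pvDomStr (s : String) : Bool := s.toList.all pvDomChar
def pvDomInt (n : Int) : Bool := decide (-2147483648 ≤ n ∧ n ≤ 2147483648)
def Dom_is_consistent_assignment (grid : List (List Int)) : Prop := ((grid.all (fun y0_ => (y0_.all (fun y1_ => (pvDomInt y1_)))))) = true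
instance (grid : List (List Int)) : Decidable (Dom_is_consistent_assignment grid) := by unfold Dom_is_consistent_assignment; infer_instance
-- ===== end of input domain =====

-- B replaces A's three scoped passes (rows, columns, boxes, each with fresh sets) by one
-- row-major pass over the 81 cells maintaining a single set of (unit, value) keys for all
-- 27 units; same return value on every grid A accepts (equality of the two ports is proved
-- for ALL grids; Pre_ only excludes grids where the Python A raises IndexError).

-- ===== PORT A =====
-- grid[r][c]; inside Pre_ every access is in range, so the defaults are never returned
def gv (grid : List (List Int)) (r c : Int) : Int :=
  PySem.List.pyGetD (PySem.List.pyGetD grid r []) c 0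

-- one 'seen'-scan of A over a list of cell coordinates (none = the Python 'return False')
def aScan (grid : List (List Int)) : List (Int × Int) → PySem.Set Int → Option (PySem.Set Int)
  | [], seen => some seen
  | rc :: rest, seen =>
    let v := gv grid rc.1 rc.2
    if v ≠ 0 then
      if PySem.Set.contains seen v then none
      else aScan grid rest (PySem.Set.add seen v)
    else aScan grid rest seen

-- one of A's passes: each group gets a fresh 'seen = set()'
def aPass (grid : List (List Int)) : List (List (Int × Int)) → Bool
  | [] => true
  | g :: gs => (aScan grid g PySem.Set.empty).isSome && aPass grid gs

def rowCells (r : Int) : List (Int × Int) := (PySem.List.pyRange 0 9 1).map (fun c => (r, c))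
def colCells (c : Int) : List (Int × Int) := (PySem.List.pyRange 0 9 1).map (fun r => (r, c))
def boxCells (br bc : Int) : List (Int × Int) :=
  (PySem.List.pyRange br (br + 3) 1).flatMap
    (fun r => (PySem.List.pyRange bc (bc + 3) 1).map (fun c => (r, c)))

def rowGroups : List (List (Int × Int)) := (PySem.List.pyRange 0 9 1).map rowCells
def colGroups : List (List (Int × Int)) := (PySem.List.pyRange 0 9 1).map colCells
def boxGroups : List (List (Int × Int)) :=
  (PySem.List.pyRange 0 9 3).flatMap
    (fun br => (PySem.List.pyRange 0 9 3).map (fun bc => boxCells br bc))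

def is_consistent_assignment (grid : List (List Int)) : Bool :=
  aPass grid rowGroups && aPass grid colGroups && aPass grid boxGroups

-- ===== PORT B =====
-- the three unit tags of cell (r, c): row r, column 9+c, box 18+(r//3)*3+c//3
def unitsOf (r c : Int) : List Int :=
  [r, 9 + c, 18 + (PySem.Int.floordiv r 3) * 3 + PySem.Int.floordiv c 3]

-- 'for u in (…): if (u, v) in seen: return False; seen.add((u, v))'
def bUnits (v : Int) : List Int → PySem.Set (Int × Int) → Option (PySem.Set (Int × Int))
  | [], seen => some seen
  | u :: us, seen =>
    if PySem.Set.contains seen (u, v) then none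
    else bUnits v us (PySem.Set.add seen (u, v))

-- the single row-major pass over the cells, threading the one 'seen' set
def bScan (grid : List (List Int)) : List (Int × Int) → PySem.Set (Int × Int) → Option (PySem.Set (Int × Int))
  | [], seen => some seen
  | rc :: rest, seen =>
    let v := gv grid rc.1 rc.2
    if v ≠ 0 then
      match bUnits v (unitsOf rc.1 rc.2) seen with
      | none => none
      | some seen' => bScan grid rest seen'
    else bScan grid rest seen

def cells81 : List (Int × Int) :=
  (PySem.List.pyRange 0 9 1).flatMap
    (fun r => (PySem.List.pyRange 0 9 1).map (fun c => (r, c)))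

def is_consistent_assignment_alt (grid : List (List Int)) : Bool :=
  (bScan grid cells81 PySem.Set.empty).isSome

-- ===== PRECONDITION & SPEC =====
-- Pre_ excludes exactly the grids on which the Python A raises IndexError: A returns iff
-- either the first 9 rows all exist with ≥ 9 entries, or some row r < 9 exists whose first
-- 9 entries contain a repeated nonzero value while every earlier row is complete and clean
-- (then A returns False in the row pass before reaching any missing cell).
def Pre_is_consistent_assignment (grid : List (List Int)) : Prop :=
  (9 ≤ grid.length ∧ ∀ row ∈ grid.take 9, 9 ≤ row.length)
  ∨ ∃ r < 9, r < grid.length ∧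
      (∀ r' < r, 9 ≤ (grid.getD r' []).length ∧
        (((grid.getD r' []).take 9).filter (fun v => decide (v ≠ 0))).Nodup) ∧
      ¬ (((grid.getD r []).take 9).filter (fun v => decide (v ≠ 0))).Nodup
instance (grid : List (List Int)) : Decidable (Pre_is_consistent_assignment grid) := by
  unfold Pre_is_consistent_assignment; infer_instance

def pvWitness_is_consistent_assignment : List (List Int) :=
  List.replicate 9 (List.replicate 9 0)

def Spec_is_consistent_assignment (grid : List (List Int)) (out : Bool) : Prop := out = is_consistent_assignment_alt grid
instance (grid : List (List Int)) (out : Bool) : Decidable (Spec_is_consistent_assignment grid out) := by unfold Spec_is_consistent_assignment; infer_instance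

-- ===== CLAIM (what is proved, stated in full; the proofs are below) =====
def Claim_equal_is_consistent_assignment : Prop := ∀ (grid : List (List Int)), Dom_is_consistent_assignment grid → Pre_is_consistent_assignment grid → Spec_is_consistent_assignment grid (is_consistent_assignment grid)

-- ===== LEMMAS AND PROOFS =====

-- the generic duplicate scan both ports are instances of
def dscan {α : Type} [BEq α] : List α → PySem.Set α → Option (PySem.Set α)
  | [], s => some s
  | x :: xs, s =>
    if PySem.Set.contains s x then none else dscan xs (PySem.Set.add s x)

theorem dscan_append {α : Type} [BEq α] (l₁ l₂ : List α) (s : PySem.Set α) :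
    dscan (l₁ ++ l₂) s = (dscan l₁ s).bind (fun s' => dscan l₂ s') := by
  induction l₁ generalizing s with
  | nil => rfl
  | cons x xs ih =>
    simp only [List.cons_append, dscan]
    split <;> simp [ih]

theorem dscan_isSome {α : Type} [BEq α] [LawfulBEq α] (l : List α) (s : PySem.Set α) :
    (dscan l s).isSome = true ↔ l.Nodup ∧ ∀ x ∈ l, x ∉ s := by
  induction l generalizing s with
  | nil => simp [dscan]
  | cons x xs ih =>
    simp only [dscan]
    by_cases hx : x ∈ s
    · simp [hx]
    · rw [if_neg (by simpa [PySem.Set.contains_iff] using hx)]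
      rw [ih]
      simp only [List.nodup_cons, List.mem_cons, PySem.Set.mem_add]
      constructor
      · rintro ⟨hnd, hmem⟩
        refine ⟨⟨fun hxx => (hmem x hxx) (Or.inr rfl), hnd⟩, ?_⟩
        rintro y (rfl | hy)
        · exact hx
        · exact fun hys => (hmem y hy) (Or.inl hys)
      · rintro ⟨⟨hxxs, hnd⟩, hmem⟩
        refine ⟨hnd, fun y hy => ?_⟩
        rintro (hys | rfl)
        · exact hmem y (Or.inr hy) hys
        · exact hxxs hy

-- the nonzero values of a coordinate list, in order
def nzvals (grid : List (List Int)) (cells : List (Int × Int)) : List Int :=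
  (cells.map (fun rc => gv grid rc.1 rc.2)).filter (fun v => decide (v ≠ 0))

theorem aScan_eq_dscan (grid : List (List Int)) (cells : List (Int × Int)) (s : PySem.Set Int) :
    aScan grid cells s = dscan (nzvals grid cells) s := by
  induction cells generalizing s with
  | nil => rfl
  | cons rc rest ih =>
    simp only [aScan, nzvals, List.map_cons, List.filter_cons]
    by_cases hv : gv grid rc.1 rc.2 = 0
    · simp only [hv]
      simpa [nzvals] using ih s
    · simp only [hv, if_neg hv, decide_true, ne_eq, not_false_eq_true, if_true, dscan]
      split <;> simp [ih, nzvals]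

theorem aPass_iff (grid : List (List Int)) (gs : List (List (Int × Int))) :
    aPass grid gs = true ↔ ∀ g ∈ gs, (nzvals grid g).Nodup := by
  induction gs with
  | nil => simp [aPass]
  | cons g gs ih =>
    simp only [aPass, Bool.and_eq_true, ih, aScan_eq_dscan, dscan_isSome, List.mem_cons]
    constructor
    · rintro ⟨⟨h1, _⟩, h2⟩ g' (rfl | hg') ; exact h1; exact h2 g' hg'
    · intro h
      exact ⟨⟨h g (Or.inl rfl), by intro x _ hx; simp [PySem.Set.empty] at hx⟩,
        fun g' hg' => h g' (Or.inr hg')⟩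

-- B's inner unit loop is a duplicate scan over the tagged items
theorem bUnits_eq_dscan (v : Int) (us : List Int) (s : PySem.Set (Int × Int)) :
    bUnits v us s = dscan (us.map (fun u => (u, v))) s := by
  induction us generalizing s with
  | nil => rfl
  | cons u us ih => simp only [bUnits, List.map_cons, dscan]; split <;> simp [ih]

-- the tagged items contributed by one cell
def items (grid : List (List Int)) (rc : Int × Int) : List (Int × Int) :=
  let v := gv grid rc.1 rc.2
  if v ≠ 0 then (unitsOf rc.1 rc.2).map (fun u => (u, v)) else []

theorem bScan_eq_dscan (grid : List (List Int)) (cells : List (Int × Int)) (s : PySem.Set (Int × Int)) :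
    bScan grid cells s = dscan (cells.flatMap (items grid)) s := by
  induction cells generalizing s with
  | nil => rfl
  | cons rc rest ih =>
    simp only [bScan, items, List.flatMap_cons, dscan_append]
    by_cases hv : gv grid rc.1 rc.2 = 0
    · simp only [hv]
      simpa using ih s
    · simp only [if_neg hv, bUnits_eq_dscan]
      rcases hd : dscan ((unitsOf rc.1 rc.2).map (fun u => (u, gv grid rc.1 rc.2))) s with _ | s'
      · simp [if_neg hv, hd]
      · simp [if_neg hv, hd, ih]

-- per-unit item lists
def rItem (grid : List (List Int)) (rc : Int × Int) : List (Int × Int) :=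
  let v := gv grid rc.1 rc.2
  if v ≠ 0 then [(rc.1, v)] else []
def cItem (grid : List (List Int)) (rc : Int × Int) : List (Int × Int) :=
  let v := gv grid rc.1 rc.2
  if v ≠ 0 then [(9 + rc.2, v)] else []
def xItem (grid : List (List Int)) (rc : Int × Int) : List (Int × Int) :=
  let v := gv grid rc.1 rc.2
  if v ≠ 0 then [(18 + (PySem.Int.floordiv rc.1 3) * 3 + PySem.Int.floordiv rc.2 3, v)] else []

theorem items_split (grid : List (List Int)) (rc : Int × Int) :
    items grid rc = rItem grid rc ++ (cItem grid rc ++ xItem grid rc) := by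
  simp only [items, rItem, cItem, xItem, unitsOf, List.map_cons, List.map_nil]
  split <;> rfl

theorem flatMap_append_perm {ι α : Type} (l : List ι) (f g : ι → List α) :
    (l.flatMap (fun x => f x ++ g x)).Perm (l.flatMap f ++ l.flatMap g) := by
  induction l with
  | nil => simp
  | cons a l ih =>
    simp only [List.flatMap_cons]
    refine (ih.append_left (f a ++ g a)).trans ?_
    simp only [List.append_assoc]
    exact (List.perm_append_comm_assoc (g a) (l.flatMap f) (l.flatMap g)).append_left (f a)

theorem flatten_flatMap {α : Type} (l : List (List (Int × Int))) (g : Int × Int → List α) :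
    List.flatMap g l.flatten = l.flatMap (fun x => x.flatMap g) := by
  induction l with
  | nil => rfl
  | cons a l ih => simp [List.flatMap_append, ih]

-- nodup of a flatMap whose chunks carry pairwise distinct keys
theorem nodup_flatMap_keyed {ι : Type} (l : List ι) (f : ι → List (Int × Int)) (k : ι → Int)
    (h : ∀ i ∈ l, ∀ x ∈ f i, x.1 = k i) (hn : (l.map k).Nodup) :
    (l.flatMap f).Nodup ↔ ∀ i ∈ l, (f i).Nodup := by
  induction l with
  | nil => simp
  | cons a l ih =>
    simp only [List.map_cons, List.nodup_cons, List.mem_map] at hn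
    obtain ⟨hka, hnl⟩ := hn
    simp only [List.flatMap_cons, List.nodup_append]
    rw [ih (fun i hi x hx => h i (List.mem_cons_of_mem a hi) x hx) hnl]
    constructor
    · rintro ⟨h1, h2, _⟩ i hi
      rcases List.mem_cons.mp hi with rfl | hi
      · exact h1
      · exact h2 i hi
    · intro hall
      refine ⟨hall a (List.mem_cons_self ..), fun i hi => hall i (List.mem_cons_of_mem a hi), ?_⟩
      intro x hxa y hyl
      rcases List.mem_flatMap.mp hyl with ⟨i, hi, hyi⟩
      rintro rfl
      exact hka ⟨i, hi, (h i (List.mem_cons_of_mem a hi) x hyi).symm.trans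
        (h a (List.mem_cons_self ..) x hxa)⟩

-- a chunk whose key function is constant on the group is a tagged copy of its nonzero values
theorem flatMap_item_eq_map (grid : List (List Int)) (keyf : Int × Int → Int) (k0 : Int)
    (g : List (Int × Int)) (hk : ∀ rc ∈ g, keyf rc = k0) :
    (g.flatMap (fun rc => if gv grid rc.1 rc.2 ≠ 0 then [(keyf rc, gv grid rc.1 rc.2)] else []))
      = (nzvals grid g).map (fun v => (k0, v)) := by
  induction g with
  | nil => rfl
  | cons rc g ih =>
    have hrc := hk rc (List.mem_cons_self ..)
    have ih' := ih (fun rc' h' => hk rc' (List.mem_cons_of_mem rc h'))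
    simp only [List.flatMap_cons, ih']
    by_cases hv : gv grid rc.1 rc.2 = 0
    · simp [nzvals, hv]
    · simp [nzvals, hv, hrc]

theorem nodup_chunk_iff (grid : List (List Int)) (keyf : Int × Int → Int) (k0 : Int)
    (g : List (Int × Int)) (hk : ∀ rc ∈ g, keyf rc = k0) :
    (g.flatMap (fun rc => if gv grid rc.1 rc.2 ≠ 0 then [(keyf rc, gv grid rc.1 rc.2)] else [])).Nodup
      ↔ (nzvals grid g).Nodup := by
  rw [flatMap_item_eq_map grid keyf k0 g hk]
  exact List.nodup_map_iff (fun a b h => by simpa using congrArg Prod.snd h)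

-- key bound of all items of one pass
theorem mem_pass_key_bound (grid : List (List Int)) (keyf : Int × Int → Int)
    (cells : List (Int × Int)) (lo hi : Int)
    (hb : ∀ rc ∈ cells, lo ≤ keyf rc ∧ keyf rc < hi) :
    ∀ x ∈ cells.flatMap
      (fun rc => if gv grid rc.1 rc.2 ≠ 0 then [(keyf rc, gv grid rc.1 rc.2)] else []),
      lo ≤ x.1 ∧ x.1 < hi := by
  intro x hx
  rcases List.mem_flatMap.mp hx with ⟨rc, hrc, hxrc⟩
  by_cases hv : gv grid rc.1 rc.2 ≠ 0
  · rw [if_pos hv] at hxrc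
    rw [List.mem_singleton.mp hxrc]
    exact hb rc hrc
  · rw [if_neg hv] at hxrc
    cases hxrc

-- one of A's passes, as a nodup statement about its item list
theorem pass_nodup_iff (grid : List (List Int)) (groups : List (List (Int × Int)))
    (keyf : Int × Int → Int)
    (hkey : ∀ g ∈ groups, ∀ rc ∈ g, keyf rc = keyf (g.headD (0, 0)))
    (hn : (groups.map (fun g => keyf (g.headD (0, 0)))).Nodup) :
    (List.flatMap (fun rc => if gv grid rc.1 rc.2 ≠ 0 then [(keyf rc, gv grid rc.1 rc.2)] else [])
        groups.flatten).Nodup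
      ↔ ∀ g ∈ groups, (nzvals grid g).Nodup := by
  rw [flatten_flatMap]
  refine (nodup_flatMap_keyed groups _ (fun g => keyf (g.headD (0, 0))) ?_ hn).trans ?_
  · intro g hg x hx
    rcases List.mem_flatMap.mp hx with ⟨rc, hrc, hxrc⟩
    by_cases hv : gv grid rc.1 rc.2 ≠ 0
    · rw [if_pos hv] at hxrc
      rw [List.mem_singleton.mp hxrc]
      exact hkey g hg rc hrc
    · rw [if_neg hv] at hxrc
      cases hxrc
  · exact ⟨fun h g hg => (nodup_chunk_iff grid keyf _ g (hkey g hg)).mp (h g hg),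
      fun h g hg => (nodup_chunk_iff grid keyf _ g (hkey g hg)).mpr (h g hg)⟩

-- A's value, as three universally quantified nodup conditions
theorem a_iff (grid : List (List Int)) :
    is_consistent_assignment grid = true ↔
      (∀ g ∈ rowGroups, (nzvals grid g).Nodup) ∧
      (∀ g ∈ colGroups, (nzvals grid g).Nodup) ∧
      (∀ g ∈ boxGroups, (nzvals grid g).Nodup) := by
  simp only [is_consistent_assignment, Bool.and_eq_true, aPass_iff]
  tauto

-- B's value, as nodup of its single tagged item list
theorem b_iff (grid : List (List Int)) :
    is_consistent_assignment_alt grid = true ↔ (cells81.flatMap (items grid)).Nodup := by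
  rw [is_consistent_assignment_alt, bScan_eq_dscan, dscan_isSome]
  simp [PySem.Set.empty]

-- the three per-pass item lists, over the row-major cell order
def rList (grid : List (List Int)) : List (Int × Int) := cells81.flatMap
  (fun rc => if gv grid rc.1 rc.2 ≠ 0 then [(rc.1, gv grid rc.1 rc.2)] else [])
def cList (grid : List (List Int)) : List (Int × Int) := cells81.flatMap
  (fun rc => if gv grid rc.1 rc.2 ≠ 0 then [(9 + rc.2, gv grid rc.1 rc.2)] else [])
def xList (grid : List (List Int)) : List (Int × Int) := cells81.flatMap
  (fun rc => if gv grid rc.1 rc.2 ≠ 0 then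
    [(18 + (PySem.Int.floordiv rc.1 3) * 3 + PySem.Int.floordiv rc.2 3, gv grid rc.1 rc.2)] else [])

theorem items_perm (grid : List (List Int)) :
    (cells81.flatMap (items grid)).Perm (rList grid ++ (cList grid ++ xList grid)) := by
  rw [show items grid = fun rc => rItem grid rc ++ (cItem grid rc ++ xItem grid rc) from
    funext (items_split grid)]
  refine (flatMap_append_perm cells81 (fun rc => rItem grid rc) _).trans ?_
  exact (flatMap_append_perm cells81 (fun rc => cItem grid rc) (fun rc => xItem grid rc)).append_left _

theorem ports_agree (grid : List (List Int)) :
    is_consistent_assignment grid = is_consistent_assignment_alt grid := by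
  rw [Bool.eq_iff_iff, a_iff, b_iff, (items_perm grid).nodup_iff,
    List.nodup_append, List.nodup_append]
  have hR : (rList grid).Nodup ↔ ∀ g ∈ rowGroups, (nzvals grid g).Nodup := by
    rw [rList, show cells81 = rowGroups.flatten by decide]
    exact pass_nodup_iff grid rowGroups (fun rc => rc.1) (by decide) (by decide)
  have hC : (cList grid).Nodup ↔ ∀ g ∈ colGroups, (nzvals grid g).Nodup := by
    have hp : (colGroups.flatten).Perm cells81 := by decide
    rw [cList, ← (hp.flatMap_right _).nodup_iff]
    exact pass_nodup_iff grid colGroups (fun rc => 9 + rc.2) (by decide) (by decide)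
  have hX : (xList grid).Nodup ↔ ∀ g ∈ boxGroups, (nzvals grid g).Nodup := by
    have hp : (boxGroups.flatten).Perm cells81 := by decide
    rw [xList, ← (hp.flatMap_right _).nodup_iff]
    exact pass_nodup_iff grid boxGroups
      (fun rc => 18 + (PySem.Int.floordiv rc.1 3) * 3 + PySem.Int.floordiv rc.2 3)
      (by decide) (by decide)
  have hbR := mem_pass_key_bound grid (fun rc => rc.1) cells81 0 9 (by decide)
  have hbC := mem_pass_key_bound grid (fun rc => 9 + rc.2) cells81 9 18 (by decide)
  have hbX := mem_pass_key_bound grid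
    (fun rc => 18 + (PySem.Int.floordiv rc.1 3) * 3 + PySem.Int.floordiv rc.2 3)
    cells81 18 27 (by decide)
  have hdCX : ∀ a ∈ cList grid, ∀ b ∈ xList grid, a ≠ b := by
    intro a ha b hb
    have h1 := hbC a ha
    have h2 := hbX b hb
    rintro rfl
    omega
  have hdRCX : ∀ a ∈ rList grid, ∀ b ∈ cList grid ++ xList grid, a ≠ b := by
    intro a ha b hb
    have h1 := hbR a ha
    rcases List.mem_append.mp hb with hb' | hb'
    · have h2 := hbC b hb'
      rintro rfl
      omega
    · have h2 := hbX b hb'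
      rintro rfl
      omega
  constructor
  · rintro ⟨h1, h2, h3⟩
    exact ⟨hR.mpr h1, ⟨hC.mpr h2, hX.mpr h3, hdCX⟩, hdRCX⟩
  · rintro ⟨h1, ⟨h2, h3, -⟩, -⟩
    exact ⟨hR.mp h1, hC.mp h2, hX.mp h3⟩

-- ===== VERDICT (by name: the statement is the Claim_ definition above) =====
theorem is_consistent_assignment_spec : Claim_equal_is_consistent_assignment := by
  intro grid _ _
  exact ports_agree grid
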